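-- pv_equiv track=rewrite | github.com/WuTheFWasThat/send-a-damned-message | py/levels/madden.py | fn
-- ===== SOURCE A (Python) =====
-- def fn(x):
--     n = len(x)
--     starts = [0]
--     ends = []
--     for i in range(1, n):
--         if x[i] == x[i - 1]:
--             starts.append(i)
--             ends.append(i)
--     ends.append(n)
--     xs = [
--         x[s:e] for (s, e) in zip(starts, ends)
--     ]
--     return ''.join([
--         part[::-1] for part in xs
--     ])
-- ===== SOURCE B (Python) =====
-- def fn(x):
--     if not x:
--         return ''
--     parts = []
--     buf = [x[0]]
--     prev = x[0]
--     for c in x[1:]: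
--         if c == prev:
--             parts.append(''.join(reversed(buf)))
--             buf = [c]
--         else:
--             buf.append(c)
--         prev = c
--     parts.append(''.join(reversed(buf)))
--     return ''.join(parts)
-- ===== Notes on version B (the rewrite author's own statement) =====
-- stated objective: simpler
-- what changed: Single streaming pass with a current-segment buffer that is reversed and emitted at each equal-adjacent boundary, replacing A's starts/ends index lists, zip, and second slice-and-reverse comprehension pass.
import Mathlib
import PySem

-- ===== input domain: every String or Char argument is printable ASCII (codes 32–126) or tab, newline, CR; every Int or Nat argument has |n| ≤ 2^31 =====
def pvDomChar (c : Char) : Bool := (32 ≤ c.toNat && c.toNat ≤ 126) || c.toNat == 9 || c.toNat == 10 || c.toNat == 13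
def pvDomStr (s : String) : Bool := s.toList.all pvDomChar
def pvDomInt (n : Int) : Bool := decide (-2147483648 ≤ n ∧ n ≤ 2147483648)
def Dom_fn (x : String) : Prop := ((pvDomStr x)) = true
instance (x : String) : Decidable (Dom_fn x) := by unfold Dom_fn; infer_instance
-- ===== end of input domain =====

-- B replaces A's starts/ends index lists and its second slice-and-reverse pass by one
-- streaming pass over the characters with a current-segment buffer (objective: simpler).


-- ===== PORT A =====
-- literal transliteration of A; x[s:e] is PySem.List.slice, part[::-1] is List.reverse
-- (PySem.List.slice?_none_none_neg_one), ''.join is flatten.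
def fn (x : String) : String :=
  let xs := x.toList
  let n : Int := xs.length
  let se := (PySem.List.pyRange 1 n 1).foldl
      (fun (se : List Int × List Int) i =>
        if PySem.List.pyGet? xs i = PySem.List.pyGet? xs (i - 1) then
          (se.1 ++ [i], se.2 ++ [i])
        else se)
      ([0], [])
  let starts := se.1
  let ends := se.2 ++ [n]
  let parts := (starts.zip ends).map (fun p => PySem.List.slice xs (some p.1) (some p.2))
  String.ofList ((parts.map (fun part => part.reverse)).flatten)

-- ===== PORT B =====
-- literal transliteration of Source B: one fold over the tail with state (parts, buf, prev).
def fn_alt (x : String) : String :=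
  match x.toList with
  | [] => ""
  | h :: t =>
    let st := t.foldl
        (fun (st : List (List Char) × List Char × Char) c =>
          if c = st.2.2 then (st.1 ++ [st.2.1.reverse], [c], c)
          else (st.1, st.2.1 ++ [c], c))
        ([], [h], h)
    String.ofList ((st.1 ++ [st.2.1.reverse]).flatten)

-- ===== PRECONDITION & SPEC =====
def Spec_fn (x : String) (out : String) : Prop := out = fn_alt x
instance (x : String) (out : String) : Decidable (Spec_fn x out) := by unfold Spec_fn; infer_instance

-- ===== CLAIM (what is proved, stated in full; the proofs are below) =====
def Claim_equal_fn : Prop := ∀ (x : String), Dom_fn x → Spec_fn x (fn x)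

-- ===== LEMMAS AND PROOFS =====

-- the unreversed segments of prev::t, streaming form common to both proofs
def segsGo (prev : Char) (buf : List Char) : List Char → List (List Char)
  | [] => [buf]
  | c :: t => if c = prev then buf :: segsGo c [c] t else segsGo c (buf ++ [c]) t

-- A's cut indices from position i on
def cutsN (xs : List Char) (i : Nat) : List Int :=
  (PySem.List.pyRange i xs.length 1).filter
    (fun j => decide (PySem.List.pyGet? xs j = PySem.List.pyGet? xs (j - 1)))

-- the slices of the consecutive intervals s :: cs :: … :: n
def ivals (xs : List Char) (s : Int) : List Int → List (List Char)
  | [] => [PySem.List.slice xs (some s) (some xs.length)]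
  | c :: cs => PySem.List.slice xs (some s) (some c) :: ivals xs c cs

lemma b_fold (t : List Char) : ∀ (parts : List (List Char)) (buf : List Char) (prev : Char),
    (let st := t.foldl
        (fun (st : List (List Char) × List Char × Char) c =>
          if c = st.2.2 then (st.1 ++ [st.2.1.reverse], [c], c)
          else (st.1, st.2.1 ++ [c], c))
        (parts, buf, prev)
     st.1 ++ [st.2.1.reverse]) = parts ++ (segsGo prev buf t).map List.reverse := by
  induction t with
  | nil => intro parts buf prev; simp [segsGo]
  | cons c t ih =>
    intro parts buf prev
    by_cases h : c = prev <;> simp [segsGo, h, List.foldl_cons, ih]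

lemma a_fold (r : List Int) (xs : List Char) :
    ∀ (s0 e0 : List Int),
    r.foldl (fun (se : List Int × List Int) i =>
        if PySem.List.pyGet? xs i = PySem.List.pyGet? xs (i - 1) then
          (se.1 ++ [i], se.2 ++ [i])
        else se) (s0, e0)
    = (s0 ++ r.filter (fun j => decide (PySem.List.pyGet? xs j = PySem.List.pyGet? xs (j - 1))),
       e0 ++ r.filter (fun j => decide (PySem.List.pyGet? xs j = PySem.List.pyGet? xs (j - 1)))) := by
  induction r with
  | nil => intro s0 e0; simp
  | cons i r ih =>
    intro s0 e0
    by_cases h : PySem.List.pyGet? xs i = PySem.List.pyGet? xs (i - 1) <;>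
      simp [List.foldl_cons, h, ih]

lemma zip_ivals (xs : List Char) : ∀ (cs : List Int) (s : Int),
    ((s :: cs).zip (cs ++ [(xs.length : Int)])).map
      (fun p => PySem.List.slice xs (some p.1) (some p.2)) = ivals xs s cs := by
  intro cs
  induction cs with
  | nil => intro s; simp [ivals]
  | cons c cs ih => intro s; simp [ivals, ih]

lemma main_lemma (xs : List Char) (d : Char) : ∀ (k i s : Nat), i + k = xs.length → 1 ≤ i → s < i →
    ivals xs (s : Int) (cutsN xs i)
      = segsGo (xs.getD (i - 1) d) ((xs.drop s).take (i - s)) (xs.drop i) := by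
  intro k
  induction k with
  | zero =>
    intro i s hk h1 hs
    have hi : i = xs.length := by omega
    subst hi
    have hc : cutsN xs xs.length = [] := by
      simp [cutsN, PySem.List.pyRange_one_eq_nil le_rfl]
    rw [hc]
    simp only [ivals, List.drop_length, segsGo]
    rw [PySem.List.slice_natCast]
  | succ k ih =>
    intro i s hk h1 hs
    have hin : i < xs.length := by omega
    have hdrop : xs.drop i = xs[i] :: xs.drop (i + 1) := by
      rw [List.drop_eq_getElem_cons hin]
    have hcuts : cutsN xs i
        = (if xs[i] = xs.getD (i - 1) d then ((i : Int)) :: cutsN xs (i + 1) else cutsN xs (i + 1)) := by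
      have hr : PySem.List.pyRange (i : Int) xs.length 1
          = (i : Int) :: PySem.List.pyRange ((i : Int) + 1) xs.length 1 :=
        PySem.List.pyRange_one_cons (by exact_mod_cast hin)
      have hcast : ((i : Int) + 1) = ((i + 1 : Nat) : Int) := by push_cast; ring
      have hg1 : PySem.List.pyGet? xs (i : Int) = some xs[i] :=
        PySem.List.pyGet?_ofNat xs i hin
      have hg2 : PySem.List.pyGet? xs ((i : Int) - 1) = some (xs.getD (i - 1) d) := by
        have : ((i : Int) - 1) = ((i - 1 : Nat) : Int) := by omega
        rw [this, PySem.List.pyGet?_natCast]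
        rw [List.getElem?_eq_getElem (by omega : i - 1 < xs.length)]
        simp [List.getD, List.getElem?_eq_getElem (by omega : i - 1 < xs.length)]
      unfold cutsN
      rw [hr, List.filter_cons, hcast]
      by_cases h : xs[i] = xs.getD (i - 1) d <;> simp [hg1, hg2, h]
    have hprev : xs.getD (i + 1 - 1) d = xs[i] := by
      simp [List.getD, List.getElem?_eq_getElem hin]
    by_cases h : xs[i] = xs.getD (i - 1) d
    · rw [hcuts, if_pos h, hdrop]
      have ihs := ih (i + 1) i (by omega) (by omega) (by omega)
      have hbuf : (xs.drop i).take (i + 1 - i) = [xs[i]] := by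
        have h1 : i + 1 - i = 1 := by omega
        rw [h1, hdrop]
        rfl
      rw [hbuf, hprev] at ihs
      simp only [ivals, segsGo]
      rw [ihs, if_pos h]
      congr 1
      rw [PySem.List.slice_natCast]
    · rw [hcuts, if_neg h, hdrop]
      have ihs := ih (i + 1) s (by omega) (by omega) (by omega)
      have hbuf : (xs.drop s).take (i + 1 - s) = (xs.drop s).take (i - s) ++ [xs[i]] := by
        have h1 : i + 1 - s = (i - s) + 1 := by omega
        rw [h1, List.take_add_one]
        congr 1
        rw [List.getElem?_drop]
        have h2 : s + (i - s) = i := by omega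
        rw [h2, List.getElem?_eq_getElem hin]
        rfl
      rw [hbuf, hprev] at ihs
      simp only [segsGo]
      rw [ihs, if_neg h]

theorem fn_eq_segs (h : Char) (t : List Char) :
    fn (String.ofList (h :: t)) = String.ofList (((segsGo h [h] t).map List.reverse).flatten) := by
  unfold fn
  simp only [String.toList_ofList]
  rw [a_fold]
  have hC : List.filter (fun j => decide (PySem.List.pyGet? (h :: t) j = PySem.List.pyGet? (h :: t) (j - 1)))
      (PySem.List.pyRange 1 ((h :: t).length : Int) 1) = cutsN (h :: t) 1 := by
    simp [cutsN]
  simp only [List.nil_append, List.cons_append, hC]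
  rw [show ((0 : Int)) = ((0 : Nat) : Int) by simp]
  rw [zip_ivals]
  rw [main_lemma (h :: t) h (t.length) 1 0 (by simp; omega) (by omega) (by omega)]
  simp

theorem fn_alt_eq_segs (h : Char) (t : List Char) :
    fn_alt (String.ofList (h :: t)) = String.ofList (((segsGo h [h] t).map List.reverse).flatten) := by
  unfold fn_alt
  simp only [String.toList_ofList]
  have hb := b_fold t [] [h] h
  simp only at hb
  rw [hb]
  simp

-- ===== VERDICT (by name: the statement is the Claim_ definition above) =====
theorem fn_spec : Claim_equal_fn := by
  intro x _
  unfold Spec_fn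
  have hx : x = String.ofList x.toList := by simp
  cases hl : x.toList with
  | nil =>
    rw [hx, hl]
    decide
  | cons h t =>
    rw [hx, hl, fn_eq_segs, fn_alt_eq_segs]
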